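-- pv_equiv track=rewrite | github.com/IgrMd/yandex-algos-training | Тренировки по алгоритмам 6.0/Лекция 2. Префиксные суммы и два указателя/F.py | sum_triplets_fast
-- ===== SOURCE A (Python) =====
-- MODULO = 1000000007
--
-- def sum_triplets_fast(n, nums: list[int]):
--     pref_sums = [0] * (n + 1)
--     for i in range(n):
--         pref_sums[i + 1] = pref_sums[i] + nums[i]
--     pre_mult = [0] * n
--     for i in range(n):
--         pre_mult[i] = nums[i] * (pref_sums[n] - pref_sums[i + 1])
--     pref_mult_sums = [0] * (n + 1)
--     for i in range(n):
--         pref_mult_sums[i + 1] = (pref_mult_sums[i] + pre_mult[i]) % MODULO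
--     ans = 0
--     for i in range(n - 2):
--         ans += (nums[i] * (pref_mult_sums[n] - pref_mult_sums[i + 1])) % MODULO
--     return ans % MODULO
-- ===== SOURCE B (Python) =====
-- MODULO = 1000000007
--
-- def sum_triplets_fast(n, nums: list[int]):
--     # One forward pass with three running accumulators (elementary symmetric sums mod p).
--     s1 = s2 = s3 = 0
--     for i in range(n):
--         x = nums[i]
--         s3 = (s3 + x * s2) % MODULO
--         s2 = (s2 + x * s1) % MODULO
--         s1 = (s1 + x) % MODULO
--     return s3
-- ===== Notes on version B (the rewrite author's own statement) =====
-- stated objective: simpler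
-- what changed: Replaced the four prefix/suffix arrays and three index loops with a single forward pass maintaining three modular accumulators (running sum, pairwise-product sum, triple-product sum).
import Mathlib
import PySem

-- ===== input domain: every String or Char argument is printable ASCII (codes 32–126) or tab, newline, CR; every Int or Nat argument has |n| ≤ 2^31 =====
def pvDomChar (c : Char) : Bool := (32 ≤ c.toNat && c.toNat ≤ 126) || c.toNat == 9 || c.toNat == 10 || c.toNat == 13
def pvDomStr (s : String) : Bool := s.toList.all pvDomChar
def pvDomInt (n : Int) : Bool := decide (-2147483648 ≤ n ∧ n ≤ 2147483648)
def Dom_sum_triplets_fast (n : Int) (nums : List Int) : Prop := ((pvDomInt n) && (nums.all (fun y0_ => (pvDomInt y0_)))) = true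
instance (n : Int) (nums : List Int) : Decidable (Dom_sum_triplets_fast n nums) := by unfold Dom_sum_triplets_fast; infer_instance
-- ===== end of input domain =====

-- B replaces A's four prefix/suffix arrays and four index loops by one forward pass with
-- three modular accumulators (running sum, pairwise-product sum, triple-product sum); same value.


-- ===== PORT A =====
-- Literal port of A. Python list indexing xs[i] is ported with PySem.List.pyGetD; under
-- Pre_ every index A evaluates is in range, so this is exact. [0]*(n+1) is
-- List.replicate (n+1).toNat 0 (Python repeats a negative count as empty; toNat clamps the same way).
def MODULO : Int := 1000000007

def sum_triplets_fast (n : Int) (nums : List Int) : Int :=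
  let pref_sums := (PySem.List.pyRange 0 n 1).foldl
    (fun a i => a.set (i + 1).toNat (PySem.List.pyGetD a i 0 + PySem.List.pyGetD nums i 0))
    (List.replicate (n + 1).toNat 0)
  let pre_mult := (PySem.List.pyRange 0 n 1).foldl
    (fun a i => a.set i.toNat
      (PySem.List.pyGetD nums i 0 * (PySem.List.pyGetD pref_sums n 0 - PySem.List.pyGetD pref_sums (i + 1) 0)))
    (List.replicate n.toNat 0)
  let pref_mult_sums := (PySem.List.pyRange 0 n 1).foldl
    (fun a i => a.set (i + 1).toNat
      (PySem.Int.mod (PySem.List.pyGetD a i 0 + PySem.List.pyGetD pre_mult i 0) MODULO))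
    (List.replicate (n + 1).toNat 0)
  let ans := (PySem.List.pyRange 0 (n - 2) 1).foldl
    (fun acc i => acc + PySem.Int.mod
      (PySem.List.pyGetD nums i 0 *
        (PySem.List.pyGetD pref_mult_sums n 0 - PySem.List.pyGetD pref_mult_sums (i + 1) 0)) MODULO)
    0
  PySem.Int.mod ans MODULO

-- ===== PORT B =====
def sum_triplets_fast_alt (n : Int) (nums : List Int) : Int :=
  let s := (PySem.List.pyRange 0 n 1).foldl
    (fun (s : Int × Int × Int) i =>
      let x := PySem.List.pyGetD nums i 0
      (PySem.Int.mod (s.1 + x) MODULO,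
       PySem.Int.mod (s.2.1 + x * s.1) MODULO,
       PySem.Int.mod (s.2.2 + x * s.2.1) MODULO))
    (0, 0, 0)
  s.2.2

-- ===== PRECONDITION & SPEC =====
-- Pre_ excludes exactly the inputs on which Python A raises IndexError (n > len(nums)).
def Pre_sum_triplets_fast (n : Int) (nums : List Int) : Prop := n ≤ (nums.length : Int)
instance (n : Int) (nums : List Int) : Decidable (Pre_sum_triplets_fast n nums) := by
  unfold Pre_sum_triplets_fast; infer_instance
def pvWitness_sum_triplets_fast : Int × List Int := (3, [1, 2, 3])

def Spec_sum_triplets_fast (n : Int) (nums : List Int) (out : Int) : Prop := out = sum_triplets_fast_alt n nums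
instance (n : Int) (nums : List Int) (out : Int) : Decidable (Spec_sum_triplets_fast n nums out) := by unfold Spec_sum_triplets_fast; infer_instance

-- ===== CLAIM (what is proved, stated in full; the proofs are below) =====
def Claim_equal_sum_triplets_fast : Prop := ∀ (n : Int) (nums : List Int), Dom_sum_triplets_fast n nums → Pre_sum_triplets_fast n nums → Spec_sum_triplets_fast n nums (sum_triplets_fast n nums)

-- ===== LEMMAS AND PROOFS =====

-- proof-side helpers: prefix sums and the suffix-structured pairwise / triple product sums
def pvS (nums : List Int) (j : Nat) : Int := (nums.take j).sum

def pvE2 : List Int → Int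
  | [] => 0
  | x :: xs => x * xs.sum + pvE2 xs

def pvE3 : List Int → Int
  | [] => 0
  | x :: xs => x * pvE2 xs + pvE3 xs

-- the exact (un-reduced) value behind A's pre_mult entries
def pvV (nums : List Int) (N j : Nat) : Int := nums.getD j 0 * (pvS nums N - pvS nums (j + 1))

-- the exact value whose residue A stores in pref_mult_sums[j]
def pvMM (nums : List Int) (N j : Nat) : Int := ((List.range j).map (pvV nums N)).sum

-- pvM: same quantity expressed over xs = nums.take N, suffix-sum form
def pvM (xs : List Int) (j : Nat) : Int :=
  ((List.range j).map (fun i => xs.getD i 0 * ((xs.drop (i + 1)).sum))).sum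

lemma pyRange_nat' (m : Int) :
    PySem.List.pyRange 0 m 1 = (List.range m.toNat).map (fun (k : Nat) => (k : Int)) := by
  rw [PySem.List.pyRange_one]
  norm_num

lemma map_pyGetD_take (nums : List Int) (N : Nat) (h : N ≤ nums.length) :
    ((List.range N).map (fun (k : Nat) => PySem.List.pyGetD nums (k : Int) 0)) = nums.take N := by
  apply List.ext_getElem
  · simp only [List.length_map, List.length_range, List.length_take]; omega
  · intro i h1 h2
    simp only [List.getElem_map, List.getElem_range, List.getElem_take,
      PySem.List.pyGetD_natCast]
    simp only [List.length_map, List.length_range] at h1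
    rw [List.getD_eq_getElem _ _ (by omega)]

lemma set_map_range (f : Nat → Int) (m i : Nat) (v : Int) :
    (((List.range m).map f).set i v) = (List.range m).map (fun j => if j = i then v else f j) := by
  apply List.ext_getElem
  · simp only [List.length_set, List.length_map]
  · intro k h1 h2
    simp only [List.length_set, List.length_map, List.length_range] at h1
    rw [List.getElem_set]
    simp only [List.getElem_map, List.getElem_range]
    by_cases hk : i = k
    · simp [hk]
    · simp [hk, Ne.symm hk]

lemma emod_add_left (p a b : Int) : (a % p + b) % p = (a + b) % p := by
  conv_lhs => rw [Int.add_emod, Int.emod_emod_of_dvd a dvd_rfl]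
  rw [← Int.add_emod]

lemma pvS_succ (nums : List Int) (k : Nat) (h : k < nums.length) :
    pvS nums (k + 1) = pvS nums k + nums.getD k 0 := by
  unfold pvS
  rw [List.take_add_one, List.sum_append, List.getElem?_eq_getElem h, List.getD_eq_getElem _ _ h]
  simp

-- A's first loop: pref_sums holds the prefix sums (unwritten cells stay 0)
lemma psA (nums : List Int) (N : Nat) (hN : N ≤ nums.length) : ∀ (k : Nat), k ≤ N →
    (((List.range k).map (fun (j : Nat) => (j : Int))).foldl
        (fun a i => a.set (i + 1).toNat (PySem.List.pyGetD a i 0 + PySem.List.pyGetD nums i 0))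
        (List.replicate (N + 1) 0))
    = (List.range (N + 1)).map (fun j => if j ≤ k then pvS nums j else 0) := by
  intro k
  induction k with
  | zero =>
    intro _
    apply List.ext_getElem
    · simp
    · intro i h1 h2
      simp only [List.range_zero, List.map_nil, List.foldl_nil, List.getElem_replicate,
        List.getElem_map, List.getElem_range]
      by_cases hi : i = 0
      · simp [hi, pvS]
      · rw [if_neg (by omega)]
  | succ k ih =>
    intro hk
    rw [List.range_succ, List.map_append, List.map_cons, List.map_nil, List.foldl_append,
      List.foldl_cons, List.foldl_nil, ih (by omega)]
    rw [show ((k : Int) + 1).toNat = k + 1 from by omega]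
    rw [PySem.List.pyGetD_natCast, PySem.List.getD_map_range _ _ _ _ (by omega),
      if_pos (le_refl k), PySem.List.pyGetD_natCast]
    rw [set_map_range]
    apply List.map_congr_left
    intro j hj
    rw [List.mem_range] at hj
    by_cases h1 : j = k + 1
    · subst h1
      rw [if_pos rfl, if_pos (by omega), pvS_succ nums k (by omega)]
    · by_cases h2 : j ≤ k
      · rw [if_neg h1, if_pos h2, if_pos (by omega)]
      · rw [if_neg h1, if_neg h2, if_neg (by omega)]

-- A's second loop: the written value does not depend on the accumulator
lemma setA (W : Int → Int) (N : Nat) : ∀ (k : Nat), k ≤ N →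
    (((List.range k).map (fun (j : Nat) => (j : Int))).foldl
        (fun a i => a.set i.toNat (W i))
        (List.replicate N 0))
    = (List.range N).map (fun j => if j < k then W (j : Int) else 0) := by
  intro k
  induction k with
  | zero =>
    intro _
    apply List.ext_getElem
    · simp
    · intro i h1 h2
      simp
  | succ k ih =>
    intro hk
    rw [List.range_succ, List.map_append, List.map_cons, List.map_nil, List.foldl_append,
      List.foldl_cons, List.foldl_nil, ih (by omega)]
    rw [show ((k : Int)).toNat = k from by omega]
    rw [set_map_range]
    apply List.map_congr_left
    intro j hj
    rw [List.mem_range] at hj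
    by_cases h1 : j = k
    · subst h1
      rw [if_pos rfl, if_pos (by omega)]
    · by_cases h2 : j < k
      · rw [if_neg h1, if_pos h2, if_pos (by omega)]
      · rw [if_neg h1, if_neg h2, if_neg (by omega)]

-- A's third loop: pref_mult_sums holds the reduced prefix sums of pre_mult
lemma pmsA (pm : List Int) (N : Nat) (v : Nat → Int) (hpm : pm = (List.range N).map v) :
    ∀ (k : Nat), k ≤ N →
    (((List.range k).map (fun (j : Nat) => (j : Int))).foldl
        (fun a i => a.set (i + 1).toNat
          (PySem.Int.mod (PySem.List.pyGetD a i 0 + PySem.List.pyGetD pm i 0) MODULO))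
        (List.replicate (N + 1) 0))
    = (List.range (N + 1)).map
        (fun j => if j ≤ k then (((List.range j).map v).sum) % MODULO else 0) := by
  have hp : (0 : Int) < MODULO := by unfold MODULO; norm_num
  intro k
  induction k with
  | zero =>
    intro _
    apply List.ext_getElem
    · simp
    · intro i h1 h2
      simp only [List.range_zero, List.map_nil, List.foldl_nil, List.getElem_replicate,
        List.getElem_map, List.getElem_range]
      by_cases hi : i = 0
      · simp [hi]
      · rw [if_neg (by omega)]
  | succ k ih =>
    intro hk
    rw [List.range_succ, List.map_append, List.map_cons, List.map_nil, List.foldl_append,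
      List.foldl_cons, List.foldl_nil, ih (by omega)]
    rw [show ((k : Int) + 1).toNat = k + 1 from by omega]
    rw [PySem.List.pyGetD_natCast, PySem.List.getD_map_range _ _ _ _ (by omega),
      if_pos (le_refl k)]
    rw [hpm, PySem.List.pyGetD_natCast, PySem.List.getD_map_range _ _ _ _ (by omega)]
    rw [PySem.Int.mod_eq_emod_of_pos hp, emod_add_left]
    rw [set_map_range]
    apply List.map_congr_left
    intro j hj
    rw [List.mem_range] at hj
    by_cases h1 : j = k + 1
    · subst h1
      rw [if_pos rfl, if_pos (by omega), List.range_succ, List.map_append, List.sum_append]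
      simp
    · by_cases h2 : j ≤ k
      · rw [if_neg h1, if_pos h2, if_pos (by omega)]
      · rw [if_neg h1, if_neg h2, if_neg (by omega)]

-- congruence of reduced sums
lemma sum_emod_congr {α : Type} (p : Int) : ∀ (l : List α) (f g : α → Int),
    (∀ i ∈ l, f i % p = g i % p) → ((l.map f).sum) % p = ((l.map g).sum) % p := by
  intro l
  induction l with
  | nil => intro f g _; rfl
  | cons a l ih =>
    intro f g h
    simp only [List.map_cons, List.sum_cons]
    rw [Int.add_emod, h a List.mem_cons_self, ih f g (fun i hi => h i (List.mem_cons_of_mem a hi)),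
      ← Int.add_emod]

-- B's fold, from an arbitrary reduced start state
lemma bfold (xs : List Int) : ∀ (s1 s2 s3 : Int),
    (xs.foldl (fun (s : Int × Int × Int) x =>
        (PySem.Int.mod (s.1 + x) MODULO,
         PySem.Int.mod (s.2.1 + x * s.1) MODULO,
         PySem.Int.mod (s.2.2 + x * s.2.1) MODULO))
      (s1 % MODULO, s2 % MODULO, s3 % MODULO))
    = ((s1 + xs.sum) % MODULO,
       (s2 + pvE2 xs + s1 * xs.sum) % MODULO,
       (s3 + pvE3 xs + s2 * xs.sum + s1 * pvE2 xs) % MODULO) := by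
  have hp : (0 : Int) < MODULO := by unfold MODULO; norm_num
  have hm : ∀ a : Int, a % MODULO % MODULO = a % MODULO :=
    fun a => Int.emod_emod_of_dvd a dvd_rfl
  induction xs with
  | nil => intro s1 s2 s3; simp [pvE2, pvE3]
  | cons x xs ih =>
    intro s1 s2 s3
    simp only [PySem.Int.mod_eq_emod_of_pos hp] at ih ⊢
    simp only [List.foldl_cons]
    have e1 : (s1 % MODULO + x) % MODULO = (s1 + x) % MODULO := emod_add_left _ _ _
    have e2 : (s2 % MODULO + x * (s1 % MODULO)) % MODULO = (s2 + x * s1) % MODULO := by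
      rw [Int.add_emod, hm, Int.mul_emod, hm, ← Int.mul_emod, ← Int.add_emod]
    have e3 : (s3 % MODULO + x * (s2 % MODULO)) % MODULO = (s3 + x * s2) % MODULO := by
      rw [Int.add_emod, hm, Int.mul_emod, hm, ← Int.mul_emod, ← Int.add_emod]
    rw [e1, e2, e3, ih (s1 + x) (s2 + x * s1) (s3 + x * s2)]
    simp only [List.sum_cons, pvE2, pvE3, Prod.mk.injEq]
    refine ⟨by congr 1; ring, by congr 1; ring, by congr 1; ring⟩

-- difference of prefix sums is a suffix sum of nums.take N
lemma S_diff (nums : List Int) (N i : Nat) (hi : i < N) :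
    pvS nums N - pvS nums (i + 1) = ((nums.take N).drop (i + 1)).sum := by
  have h := List.sum_take_add_sum_drop (nums.take N) (i + 1)
  rw [List.take_take, min_eq_left (by omega)] at h
  unfold pvS
  linarith [h]

lemma getD_take (nums : List Int) (N j : Nat) (hj : j < N) (hN : N ≤ nums.length) :
    (nums.take N).getD j 0 = nums.getD j 0 := by
  have h1 : j < (nums.take N).length := by simp [List.length_take]; omega
  rw [List.getD_eq_getElem _ _ h1, List.getElem_take, ← List.getD_eq_getElem _ _ (by omega)]

lemma hMM (nums : List Int) (N : Nat) (hN : N ≤ nums.length) (t : Nat) (ht : t ≤ N) :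
    pvMM nums N t = pvM (nums.take N) t := by
  unfold pvMM pvM
  congr 1
  apply List.map_congr_left
  intro i hi
  rw [List.mem_range] at hi
  unfold pvV
  rw [getD_take nums N i (by omega) hN, S_diff nums N i (by omega)]

-- pvE2 of a suffix as a difference of pvM
lemma pvM_drop : ∀ (k : Nat) (ys : List Int) (a : Nat), a + k = ys.length →
    pvE2 (ys.drop a) = pvM ys ys.length - pvM ys a := by
  intro k
  induction k with
  | zero =>
    intro ys a h
    rw [show a = ys.length from by omega]
    simp [pvE2, List.drop_length]
  | succ k ih =>
    intro ys a h
    have ha : a < ys.length := by omega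
    rw [List.drop_eq_getElem_cons ha]
    show ys[a] * (ys.drop (a + 1)).sum + pvE2 (ys.drop (a + 1)) = _
    rw [ih ys (a + 1) (by omega)]
    have hM : pvM ys (a + 1) = pvM ys a + ys.getD a 0 * (ys.drop (a + 1)).sum := by
      unfold pvM
      rw [List.range_succ, List.map_append, List.sum_append]
      simp
    rw [hM, List.getD_eq_getElem _ _ ha]
    ring

-- the pure triple-sum identity
lemma triple_sum : ∀ (xs : List Int),
    ((List.range xs.length).map (fun i => xs.getD i 0 * pvE2 (xs.drop (i + 1)))).sum = pvE3 xs := by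
  intro xs
  induction xs with
  | nil => simp [pvE3]
  | cons x xs ih =>
    rw [List.length_cons, List.range_succ_eq_map, List.map_cons, List.sum_cons, List.map_map]
    have h1 : ((x :: xs).getD 0 0) * pvE2 ((x :: xs).drop 1) = x * pvE2 xs := by simp
    have h2 : (List.range xs.length).map
        ((fun i => (x :: xs).getD i 0 * pvE2 ((x :: xs).drop (i + 1))) ∘ Nat.succ)
        = (List.range xs.length).map (fun i => xs.getD i 0 * pvE2 (xs.drop (i + 1))) := by
      apply List.map_congr_left
      intro j _
      simp [Function.comp, List.drop_succ_cons]
    rw [h1, h2, ih]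
    rfl

-- dropping the last two (vanishing) terms of the final sum
lemma sum_u_ext (xs : List Int) (N : Nat) (hx : xs.length = N) :
    ((List.range N).map (fun j => xs.getD j 0 * (pvM xs N - pvM xs (j + 1)))).sum
    = ((List.range (N - 2)).map (fun j => xs.getD j 0 * (pvM xs N - pvM xs (j + 1)))).sum := by
  match N with
  | 0 => rfl
  | 1 =>
    simp [pvM, List.range_succ]
  | (N + 2) =>
    rw [show N + 2 - 2 = N from by omega, List.range_succ, List.range_succ, List.map_append,
      List.map_append, List.sum_append, List.sum_append]
    have hz1 : xs.getD (N + 1) 0 * (pvM xs (N + 2) - pvM xs (N + 1 + 1)) = 0 := by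
      simp
    have hz2 : xs.getD N 0 * (pvM xs (N + 2) - pvM xs (N + 1)) = 0 := by
      have : pvM xs (N + 2) = pvM xs (N + 1) + xs.getD (N + 1) 0 * ((xs.drop (N + 2)).sum) := by
        unfold pvM
        rw [List.range_succ, List.map_append, List.sum_append]
        simp
      rw [this, show xs.drop (N + 2) = [] from by rw [List.drop_eq_nil_iff]; omega]
      simp
    simp only [List.map_cons, List.map_nil, List.sum_cons, List.sum_nil, hz1, hz2]
    ring

-- A's value, fully characterised
lemma A_eq (nums : List Int) (N : Nat) (hN : N ≤ nums.length) :
    sum_triplets_fast (N : Int) nums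
    = (((List.range (N - 2)).map
          (fun j => (nums.getD j 0 * (pvMM nums N N % MODULO - pvMM nums N (j + 1) % MODULO)) % MODULO)).sum)
      % MODULO := by
  have hp : (0 : Int) < MODULO := by unfold MODULO; norm_num
  simp only [sum_triplets_fast]
  rw [pyRange_nat' (N : Int), pyRange_nat' ((N : Int) - 2)]
  rw [show ((N : Int)).toNat = N from by omega, show ((N : Int) - 2).toNat = N - 2 from by omega,
    show ((N : Int) + 1).toNat = N + 1 from by omega]
  rw [psA nums N hN N le_rfl]
  rw [setA _ N N le_rfl]
  have hpmv : (List.range N).map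
      (fun j => if j < N then
        PySem.List.pyGetD nums (j : Int) 0 *
          (PySem.List.pyGetD ((List.range (N + 1)).map (fun j => if j ≤ N then pvS nums j else 0)) (N : Int) 0 -
           PySem.List.pyGetD ((List.range (N + 1)).map (fun j => if j ≤ N then pvS nums j else 0)) ((j : Int) + 1) 0)
        else 0)
      = (List.range N).map (pvV nums N) := by
    apply List.map_congr_left
    intro j hj
    rw [List.mem_range] at hj
    rw [if_pos hj, PySem.List.pyGetD_natCast nums j 0,
      PySem.List.pyGetD_natCast, PySem.List.getD_map_range _ _ _ _ (by omega), if_pos le_rfl,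
      show ((j : Int) + 1) = (((j + 1 : Nat)) : Int) from by omega,
      PySem.List.pyGetD_natCast, PySem.List.getD_map_range _ _ _ _ (by omega), if_pos (by omega)]
    rfl
  rw [hpmv]
  rw [pmsA _ N (pvV nums N) rfl N le_rfl]
  rw [PySem.List.foldl_add, List.map_map, zero_add, PySem.Int.mod_eq_emod_of_pos hp]
  congr 1
  apply congrArg
  apply List.map_congr_left
  intro j hj
  rw [List.mem_range] at hj
  simp only [Function.comp]
  rw [PySem.List.pyGetD_natCast nums j 0,
    PySem.List.pyGetD_natCast, PySem.List.getD_map_range _ _ _ _ (by omega), if_pos le_rfl,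
    show ((j : Int) + 1) = (((j + 1 : Nat)) : Int) from by omega,
    PySem.List.pyGetD_natCast, PySem.List.getD_map_range _ _ _ _ (by omega), if_pos (by omega),
    PySem.Int.mod_eq_emod_of_pos hp]
  rfl

-- the arithmetic core: A's characterised value is pvE3 (nums.take N) mod p
lemma A_arith (nums : List Int) (N : Nat) (hN : N ≤ nums.length) :
    (((List.range (N - 2)).map
        (fun j => (nums.getD j 0 * (pvMM nums N N % MODULO - pvMM nums N (j + 1) % MODULO)) % MODULO)).sum)
      % MODULO
    = pvE3 (nums.take N) % MODULO := by
  have hm : ∀ a : Int, a % MODULO % MODULO = a % MODULO :=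
    fun a => Int.emod_emod_of_dvd a dvd_rfl
  have hx : (nums.take N).length = N := by simp [List.length_take]; omega
  rw [sum_emod_congr MODULO (List.range (N - 2)) _
      (fun j => (nums.take N).getD j 0 * (pvM (nums.take N) N - pvM (nums.take N) (j + 1)))
      ?_]
  · rw [← sum_u_ext (nums.take N) N hx]
    have h1 : ((List.range N).map
        (fun j => (nums.take N).getD j 0 * (pvM (nums.take N) N - pvM (nums.take N) (j + 1)))).sum
        = pvE3 (nums.take N) := by
      have ht := triple_sum (nums.take N)
      rw [hx] at ht
      rw [← ht]
      apply congrArg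
      apply List.map_congr_left
      intro j hj
      rw [List.mem_range] at hj
      have hd := pvM_drop (N - (j + 1)) (nums.take N) (j + 1) (by rw [hx]; omega)
      rw [hx] at hd
      rw [hd]
    rw [h1]
  · intro j hj
    rw [List.mem_range] at hj
    show (nums.getD j 0 * (pvMM nums N N % MODULO - pvMM nums N (j + 1) % MODULO)) % MODULO % MODULO
      = ((nums.take N).getD j 0 * (pvM (nums.take N) N - pvM (nums.take N) (j + 1))) % MODULO
    rw [hm, hMM nums N hN N le_rfl, hMM nums N hN (j + 1) (by omega),
      getD_take nums N j (by omega) hN]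
    have hme : ∀ a : Int, a % MODULO ≡ a [ZMOD MODULO] :=
      fun a => Int.emod_emod_of_dvd a dvd_rfl
    exact ((Int.ModEq.refl (nums.getD j 0)).mul ((hme _).sub (hme _)))

-- B's value, fully characterised
lemma B_eq (nums : List Int) (N : Nat) (hN : N ≤ nums.length) :
    sum_triplets_fast_alt (N : Int) nums = pvE3 (nums.take N) % MODULO := by
  simp only [sum_triplets_fast_alt]
  rw [pyRange_nat' (N : Int), show ((N : Int)).toNat = N from by omega]
  rw [List.foldl_map]
  rw [← List.foldl_map (f := fun (k : Nat) => PySem.List.pyGetD nums (k : Int) 0)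
      (g := fun (s : Int × Int × Int) (x : Int) =>
        (PySem.Int.mod (s.1 + x) MODULO,
         PySem.Int.mod (s.2.1 + x * s.1) MODULO,
         PySem.Int.mod (s.2.2 + x * s.2.1) MODULO))]
  rw [map_pyGetD_take nums N hN]
  rw [show ((0 : Int), (0 : Int), (0 : Int))
      = ((0 : Int) % MODULO, (0 : Int) % MODULO, (0 : Int) % MODULO) from by norm_num]
  rw [bfold (nums.take N) 0 0 0]
  norm_num

lemma main_eq (n : Int) (nums : List Int) (hpre : n ≤ (nums.length : Int)) :
    sum_triplets_fast n nums = sum_triplets_fast_alt n nums := by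
  have hp : (0 : Int) < MODULO := by unfold MODULO; norm_num
  by_cases hneg : n < 0
  · simp only [sum_triplets_fast, sum_triplets_fast_alt]
    rw [PySem.List.pyRange_one_eq_nil (show n ≤ 0 from by omega),
      PySem.List.pyRange_one_eq_nil (show n - 2 ≤ 0 from by omega)]
    simp [PySem.Int.mod_eq_emod_of_pos hp]
  · obtain ⟨N, rfl⟩ : ∃ N : Nat, n = (N : Int) := ⟨n.toNat, (Int.toNat_of_nonneg (by omega)).symm⟩
    have hN : N ≤ nums.length := by exact_mod_cast hpre
    rw [A_eq nums N hN, B_eq nums N hN]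
    exact A_arith nums N hN

-- ===== VERDICT (by name: the statement is the Claim_ definition above) =====
theorem sum_triplets_fast_spec : Claim_equal_sum_triplets_fast := by
  intro n nums _ hpre
  exact main_eq n nums hpre
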